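-- pv_equiv track=rewrite | github.com/emcalli2/csc_110 | one_d_chess.py | move_king
-- ===== SOURCE A (Python) =====
-- def move_king(board, position,direction):
--     '''
--     This functions returns the board with moved king
--     Args:
--         board: list of pieces
--         position: index
--         direction: left or right
--     Returns:
--         the updates board with the new position of the king
--     '''
--     i = position
--     #iterates through board and moves king according to direction
--     if direction == "LEFT":
--         while i > 0 and board[i-1]=="EMPTY":
--         # moves the king left if the position next to it is empty
--             board[i-1] = board[i]
--             # makes the position the king was in empty
--             board[i] = "EMPTY"
--             # runs if the position to the left of the king is not empty
--             i -= 1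
--         if i > 0 and board[i-1] != "EMPTY":
--             board[i-1] = board[i]
--             # makes the position the king was in empty
--             board[i] = "EMPTY"
--
--     if direction == "RIGHT":
--         while i < 8 and board[i+1]=="EMPTY":
--             # moves the king right if the position next to it is empty
--             board[i+1] = board[i]
--             # makes the position the king was in empty
--             board[i] = "EMPTY"
--             # runs if the position to the right of the king is not empty
--             i += 1
--         if i < 8 and board[i+1] != "EMPTY":
--                 board[i+1] = board[i]
--                 # makes the position the king was in empty
--                 board[i] = "EMPTY"
--     return board
-- ===== SOURCE B (Python) =====
-- def move_king(board, position, direction):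
--     n = len(board)
--     if direction == "LEFT" and 0 < position < n:
--         king = board[position]
--         j = position
--         while j > 0 and board[j - 1] == "EMPTY":
--             j -= 1
--         landing = j - 1 if j > 0 else j
--         board[position] = "EMPTY"
--         board[landing] = king
--     elif direction == "RIGHT" and 0 <= position < n:
--         king = board[position]
--         j = position
--         while j < 8 and j + 1 < n and board[j + 1] == "EMPTY":
--             j += 1
--         landing = j + 1 if (j < 8 and j + 1 < n) else j
--         board[position] = "EMPTY"
--         board[landing] = king
--     return board
-- ===== Notes on version B (the rewrite author's own statement) =====
-- stated objective: simpler
-- what changed: Replaces A's cell-by-cell shuffle (two writes per empty square plus a trailing capture-if, per direction) with a single read-only scan that locates the landing square and then exactly two writes (clear the start, place the king).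
import Mathlib
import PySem

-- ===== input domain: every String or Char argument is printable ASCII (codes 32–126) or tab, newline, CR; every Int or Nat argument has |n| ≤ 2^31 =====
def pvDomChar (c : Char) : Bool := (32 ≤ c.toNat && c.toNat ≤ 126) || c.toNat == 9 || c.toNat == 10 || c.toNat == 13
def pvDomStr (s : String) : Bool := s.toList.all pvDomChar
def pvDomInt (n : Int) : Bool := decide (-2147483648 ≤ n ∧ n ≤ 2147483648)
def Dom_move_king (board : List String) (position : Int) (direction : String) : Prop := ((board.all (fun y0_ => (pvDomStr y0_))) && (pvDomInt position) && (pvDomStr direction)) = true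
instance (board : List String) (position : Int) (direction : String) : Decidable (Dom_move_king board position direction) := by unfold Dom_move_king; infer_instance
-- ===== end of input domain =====

-- B replaces A's cell-by-cell shuffle with locate-then-place (one read-only scan, two writes);
-- both Pythons mutate `board` in place and return it — the claim is about the returned value.

-- ===== PORT A =====
-- while i > 0 and board[i-1] == "EMPTY": board[i-1] = board[i]; board[i] = "EMPTY"; i -= 1
def aLeft (b : List String) (i : Int) : List String × Int :=
  if _h : 0 < i then
    match PySem.List.pyGet? b (i-1), PySem.List.pyGet? b i with
    | some prev, some cur =>
      if prev = "EMPTY" then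
        aLeft (PySem.List.pySetD (PySem.List.pySetD b (i-1) cur) i "EMPTY") (i-1)
      else (b, i)
    | _, _ => (b, i)        -- IndexError (excluded by Pre_)
  else (b, i)
termination_by i.toNat
decreasing_by omega

-- if i > 0 and board[i-1] != "EMPTY": board[i-1] = board[i]; board[i] = "EMPTY"
def aLeftCap (b : List String) (i : Int) : List String :=
  if 0 < i then
    match PySem.List.pyGet? b (i-1), PySem.List.pyGet? b i with
    | some prev, some cur =>
      if prev ≠ "EMPTY" then PySem.List.pySetD (PySem.List.pySetD b (i-1) cur) i "EMPTY" else b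
    | _, _ => b             -- IndexError (excluded by Pre_)
  else b

-- while i < 8 and board[i+1] == "EMPTY": board[i+1] = board[i]; board[i] = "EMPTY"; i += 1
def aRight (b : List String) (i : Int) : List String × Int :=
  if _h : i < 8 then
    match PySem.List.pyGet? b (i+1), PySem.List.pyGet? b i with
    | some nxt, some cur =>
      if nxt = "EMPTY" then
        aRight (PySem.List.pySetD (PySem.List.pySetD b (i+1) cur) i "EMPTY") (i+1)
      else (b, i)
    | _, _ => (b, i)        -- IndexError (excluded by Pre_)
  else (b, i)
termination_by (8 - i).toNat
decreasing_by omega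

-- if i < 8 and board[i+1] != "EMPTY": board[i+1] = board[i]; board[i] = "EMPTY"
def aRightCap (b : List String) (i : Int) : List String :=
  if i < 8 then
    match PySem.List.pyGet? b (i+1), PySem.List.pyGet? b i with
    | some nxt, some cur =>
      if nxt ≠ "EMPTY" then PySem.List.pySetD (PySem.List.pySetD b (i+1) cur) i "EMPTY" else b
    | _, _ => b             -- IndexError (excluded by Pre_)
  else b

def move_king (board : List String) (position : Int) (direction : String) : List String :=
  let b1 := if direction = "LEFT" then
              let r := aLeft board position
              aLeftCap r.1 r.2
            else board
  if direction = "RIGHT" then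
    let r := aRight b1 position
    aRightCap r.1 r.2
  else b1

-- ===== PORT B =====
-- while j > 0 and board[j-1] == "EMPTY": j -= 1   (read-only scan; all reads in range)
def scanL (b : List String) (j : Int) : Int :=
  if h : 0 < j then
    if PySem.List.pyGetD b (j-1) "" = "EMPTY" then scanL b (j-1) else j
  else j
termination_by j.toNat
decreasing_by omega

-- while j < 8 and j+1 < n and board[j+1] == "EMPTY": j += 1
def scanR (b : List String) (j n : Int) : Int :=
  if h : j < 8 ∧ j + 1 < n then
    if PySem.List.pyGetD b (j+1) "" = "EMPTY" then scanR b (j+1) n else j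
  else j
termination_by (8 - j).toNat
decreasing_by omega

def move_king_alt (board : List String) (position : Int) (direction : String) : List String :=
  let n : Int := board.length
  if direction = "LEFT" ∧ 0 < position ∧ position < n then
    let king := PySem.List.pyGetD board position ""
    let j := scanL board position
    let landing := if 0 < j then j - 1 else j
    PySem.List.pySetD (PySem.List.pySetD board position "EMPTY") landing king
  else if direction = "RIGHT" ∧ 0 ≤ position ∧ position < n then
    let king := PySem.List.pyGetD board position ""
    let j := scanR board position n
    let landing := if j < 8 ∧ j + 1 < n then j + 1 else j
    PySem.List.pySetD (PySem.List.pySetD board position "EMPTY") landing king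
  else board

-- ===== PRECONDITION & SPEC =====
-- Pre_ excludes exactly (a) the IndexErrors: LEFT from a position past the end, RIGHT from a
-- position in [0,8) whose square or every later square is off the board / "EMPTY" on a board
-- shorter than 9 (A's hard-coded bound); and (b) negative positions with RIGHT, on which A
-- RETURNS a board scrambled by Python's negative-index wraparound (pieces move across the
-- board ends) — an accident of A's indexing that B, which treats such positions as off-board
-- no-ops, does not reproduce.
def Pre_move_king (board : List String) (position : Int) (direction : String) : Prop :=
  (direction = "LEFT" → position ≤ 0 ∨ position < (board.length : Int)) ∧
  (direction = "RIGHT" → 8 ≤ position ∨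
    (0 ≤ position ∧ position < (board.length : Int) ∧
      (9 ≤ (board.length : Int) ∨ ¬ (board.drop (position.toNat + 1)).all (· = "EMPTY"))))
instance (board : List String) (position : Int) (direction : String) : Decidable (Pre_move_king board position direction) := by unfold Pre_move_king; infer_instance

def pvWitness_move_king : List String × Int × String := (["EMPTY", "KING", "EMPTY", "PAWN"], 1, "LEFT")

def Spec_move_king (board : List String) (position : Int) (direction : String) (out : List String) : Prop := out = move_king_alt board position direction
instance (board : List String) (position : Int) (direction : String) (out : List String) : Decidable (Spec_move_king board position direction out) := by unfold Spec_move_king; infer_instance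

-- ===== CLAIM (what is proved, stated in full; the proofs are below) =====
def Claim_equal_move_king : Prop := ∀ (board : List String) (position : Int) (direction : String), Dom_move_king board position direction → Pre_move_king board position direction → Spec_move_king board position direction (move_king board position direction)

-- ===== LEMMAS AND PROOFS =====

theorem scanL_nonneg (b : List String) (j : Int) (h : 0 ≤ j) : 0 ≤ scanL b j := by
  rw [scanL]
  split_ifs with h1 h2
  · exact scanL_nonneg b (j-1) (by omega)
  · exact h
  · exact h
termination_by j.toNat
decreasing_by omega

theorem scanL_le (b : List String) (j : Int) : scanL b j ≤ j := by
  rw [scanL]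
  split_ifs with h1 h2
  · have := scanL_le b (j-1); omega
  · omega
  · omega
termination_by j.toNat
decreasing_by omega

theorem scanL_set_ge (b : List String) (j : Int) (m : Nat) (v : String)
    (hm : m < b.length) (hj : j ≤ (m : Int)) : scanL (b.set m v) j = scanL b j := by
  by_cases h1 : 0 < j
  · have hr : PySem.List.pyGetD (b.set m v) (j-1) "" = PySem.List.pyGetD b (j-1) "" := by
      have e1 := PySem.List.pyGetD_eq_getElem (b.set m v) (i := j-1) "" (by omega)
        (by rw [List.length_set]; omega)
      have e2 := PySem.List.pyGetD_eq_getElem b (i := j-1) "" (by omega) (by omega)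
      rw [e1, e2]
      rw [List.getElem_set_ne (show m ≠ (j-1).toNat by omega)]
    conv_lhs => rw [scanL]
    conv_rhs => rw [scanL]
    simp only [dif_pos h1, hr]
    split_ifs with h2
    · exact scanL_set_ge b (j-1) m v hm (by omega)
    · rfl
  · conv_lhs => rw [scanL]
    conv_rhs => rw [scanL]
    simp only [dif_neg h1]
termination_by j.toNat
decreasing_by omega

theorem left_eq (b : List String) (i : Int) (h0 : 0 ≤ i) (h1 : i < (b.length : Int)) :
    aLeftCap (aLeft b i).1 (aLeft b i).2 =
      PySem.List.pySetD (PySem.List.pySetD b i "EMPTY")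
        (if 0 < scanL b i then scanL b i - 1 else scanL b i) (PySem.List.pyGetD b i "") := by
  have hgi := PySem.List.pyGet?_eq_some_getElem b (i := i) h0 h1
  have hdi := PySem.List.pyGetD_eq_getElem b (i := i) "" h0 h1
  by_cases hp : 0 < i
  · have hgp := PySem.List.pyGet?_eq_some_getElem b (i := i-1) (by omega) (by omega)
    have hdp := PySem.List.pyGetD_eq_getElem b (i := i-1) "" (by omega) (by omega)
    by_cases he : b[(i-1).toNat] = "EMPTY"
    · -- loop steps
      set a := (i-1).toNat with ha
      set c := i.toNat with hc
      have hac : a ≠ c := by omega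
      have hcl : c < b.length := by omega
      have hal : a < b.length := by omega
      set k := b[c] with hk
      have hstep : aLeft b i = aLeft ((b.set a k).set c "EMPTY") (i-1) := by
        rw [aLeft]
        simp only [dif_pos hp, hgp, hgi, if_pos he,
          PySem.List.pySetD_of_nonneg _ _ (by omega : (0:Int) ≤ i-1),
          PySem.List.pySetD_of_nonneg _ _ h0]
        rfl
      set b' := (b.set a k).set c "EMPTY" with hb'
      have hlen' : b'.length = b.length := by simp [hb']
      have IH := left_eq b' (i-1) (by omega) (by rw [hlen']; omega)
      -- scan equalities
      have hs1 : scanL b' (i-1) = scanL b (i-1) := by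
        rw [hb', scanL_set_ge _ _ _ _ (by simpa using hcl) (by omega),
            scanL_set_ge _ _ _ _ hal (by omega)]
      have hs2 : scanL b i = scanL b (i-1) := by
        conv_lhs => rw [scanL]
        rw [dif_pos hp, hdp, if_pos he]
      -- king at i-1 in b'
      have hk' : PySem.List.pyGetD b' (i-1) "" = k := by
        rw [PySem.List.pyGetD_eq_getElem b' (i := i-1) "" (by omega) (by rw [hlen']; omega)]
        simp only [hb']
        rw [List.getElem_set_ne (show c ≠ (i-1).toNat by omega)]
        exact List.getElem_set_self (by simpa using hal)
      rw [hstep, IH, hs1, hs2, hdi, hk']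
      -- boards: (b'.set (i-1) E) = b.set i E
      have hbeq : PySem.List.pySetD b' (i-1) "EMPTY" = PySem.List.pySetD b i "EMPTY" := by
        rw [PySem.List.pySetD_of_nonneg _ _ (by omega : (0:Int) ≤ i-1),
            PySem.List.pySetD_of_nonneg _ _ h0, hb']
        show ((b.set a k).set c "EMPTY").set a "EMPTY" = b.set c "EMPTY"
        rw [List.set_comm _ _ hac.symm, List.set_set]
        have : b.set a "EMPTY" = b := by rw [← he]; exact List.set_getElem_self hal
        rw [this]
      rw [hbeq]
    · -- capture immediately
      have hstop : aLeft b i = (b, i) := by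
        rw [aLeft]
        simp only [dif_pos hp, hgp, hgi, if_neg he]
      rw [hstop]
      have hscan : scanL b i = i := by
        rw [scanL]
        rw [dif_pos hp, hdp, if_neg he]
      rw [aLeftCap]
      simp only [if_pos hp, hgp, hgi, if_neg he, ite_not]
      rw [hscan, if_pos hp, hdi,
          PySem.List.pySetD_of_nonneg _ _ (by omega : (0:Int) ≤ i-1),
          PySem.List.pySetD_of_nonneg _ _ h0,
          PySem.List.pySetD_of_nonneg _ _ (by omega : (0:Int) ≤ i-1),
          PySem.List.pySetD_of_nonneg _ _ h0]
      exact List.set_comm _ _ (by omega)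
  · -- i = 0
    have hi0 : i = 0 := by omega
    have hstop : aLeft b i = (b, i) := by rw [aLeft]; simp [hp]
    rw [hstop]
    have hscan : scanL b i = i := by rw [scanL]; simp [hp]
    rw [aLeftCap, if_neg hp, hscan, if_neg hp, hdi,
        PySem.List.pySetD_of_nonneg _ _ h0, PySem.List.pySetD_of_nonneg _ _ h0,
        List.set_set, List.set_getElem_self (by omega)]
termination_by i.toNat
decreasing_by omega

theorem scanR_set_le (b : List String) (j n : Int) (m : Nat) (v : String)
    (hm : m < b.length) (hn : n ≤ (b.length : Int)) (hj : (m : Int) ≤ j) :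
    scanR (b.set m v) j n = scanR b j n := by
  by_cases h1 : j < 8 ∧ j + 1 < n
  · have hr : PySem.List.pyGetD (b.set m v) (j+1) "" = PySem.List.pyGetD b (j+1) "" := by
      have e1 := PySem.List.pyGetD_eq_getElem (b.set m v) (i := j+1) "" (by omega)
        (by rw [List.length_set]; omega)
      have e2 := PySem.List.pyGetD_eq_getElem b (i := j+1) "" (by omega) (by omega)
      rw [e1, e2]
      rw [List.getElem_set_ne (show m ≠ (j+1).toNat by omega)]
    conv_lhs => rw [scanR]
    conv_rhs => rw [scanR]
    simp only [dif_pos h1, hr]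
    split_ifs with h2
    · exact scanR_set_le b (j+1) n m v hm hn (by omega)
    · rfl
  · conv_lhs => rw [scanR]
    conv_rhs => rw [scanR]
    simp only [dif_neg h1]
termination_by (8 - j).toNat
decreasing_by omega

theorem right_eq (b : List String) (i : Int) (h0 : 0 ≤ i) (h1 : i < (b.length : Int))
    (hs : 8 < (b.length : Int) ∨
      ∃ m : Int, i < m ∧ m < (b.length : Int) ∧ PySem.List.pyGetD b m "" ≠ "EMPTY") :
    aRightCap (aRight b i).1 (aRight b i).2 =
      PySem.List.pySetD (PySem.List.pySetD b i "EMPTY")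
        (if scanR b i (b.length : Int) < 8 ∧ scanR b i (b.length : Int) + 1 < (b.length : Int)
          then scanR b i (b.length : Int) + 1 else scanR b i (b.length : Int))
        (PySem.List.pyGetD b i "") := by
  have hgi := PySem.List.pyGet?_eq_some_getElem b (i := i) h0 h1
  have hdi := PySem.List.pyGetD_eq_getElem b (i := i) "" h0 h1
  by_cases hp : i < 8
  · have hin : i + 1 < (b.length : Int) := by
      rcases hs with h | ⟨m, hm1, hm2, _⟩ <;> omega
    have hgp := PySem.List.pyGet?_eq_some_getElem b (i := i+1) (by omega) (by omega)
    have hdp := PySem.List.pyGetD_eq_getElem b (i := i+1) "" (by omega) (by omega)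
    by_cases he : b[(i+1).toNat] = "EMPTY"
    · set a := (i+1).toNat with ha
      set c := i.toNat with hc
      have hac : a ≠ c := by omega
      have hcl : c < b.length := by omega
      have hal : a < b.length := by omega
      set k := b[c] with hk
      have hstep : aRight b i = aRight ((b.set a k).set c "EMPTY") (i+1) := by
        rw [aRight]
        simp only [dif_pos hp, hgp, hgi, if_pos he,
          PySem.List.pySetD_of_nonneg _ _ (by omega : (0:Int) ≤ i+1),
          PySem.List.pySetD_of_nonneg _ _ h0]
        rfl
      set b' := (b.set a k).set c "EMPTY" with hb'
      have hlen' : b'.length = b.length := by simp [hb']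
      have hs' : 8 < (b'.length : Int) ∨
          ∃ m : Int, i + 1 < m ∧ m < (b'.length : Int) ∧ PySem.List.pyGetD b' m "" ≠ "EMPTY" := by
        rw [hlen']
        rcases hs with h | ⟨m, hm1, hm2, hm3⟩
        · exact Or.inl h
        · right
          have hdm := PySem.List.pyGetD_eq_getElem b (i := m) "" (by omega) (by omega)
          have hmne : m.toNat ≠ a := by
            intro hcon
            apply hm3
            rw [hdm]
            have h2 : b[m.toNat]? = some "EMPTY" := by
              rw [hcon]
              simp only [ha]
              rw [List.getElem?_eq_getElem (by simpa [ha] using hal)]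
              rw [he]
            rw [List.getElem?_eq_getElem (show m.toNat < b.length by omega)] at h2
            exact Option.some_injective _ h2
          refine ⟨m, by omega, hm2, ?_⟩
          have hdm' := PySem.List.pyGetD_eq_getElem b' (i := m) "" (by omega) (by rw [hlen']; omega)
          rw [hdm']
          simp only [hb']
          rw [List.getElem_set_ne (show c ≠ m.toNat by omega),
              List.getElem_set_ne (show a ≠ m.toNat from fun h => hmne h.symm)]
          rw [hdm] at hm3
          exact hm3
      have IH := right_eq b' (i+1) (by omega) (by rw [hlen']; omega) hs'
      have hs1 : scanR b' (i+1) (b'.length : Int) = scanR b (i+1) (b.length : Int) := by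
        rw [hlen', hb',
            scanR_set_le _ _ _ _ _ (by simpa using hcl) (by simp) (by omega),
            scanR_set_le _ _ _ _ _ hal (by simp) (by omega)]
      have hs2 : scanR b i (b.length : Int) = scanR b (i+1) (b.length : Int) := by
        conv_lhs => rw [scanR]
        rw [dif_pos ⟨hp, hin⟩, hdp, if_pos he]
      have hk' : PySem.List.pyGetD b' (i+1) "" = k := by
        rw [PySem.List.pyGetD_eq_getElem b' (i := i+1) "" (by omega) (by rw [hlen']; omega)]
        simp only [hb']
        rw [List.getElem_set_ne (show c ≠ (i+1).toNat by omega)]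
        exact List.getElem_set_self (by simpa using hal)
      rw [hstep, IH, hs1, hs2, hdi, hk']
      have hbeq : PySem.List.pySetD b' (i+1) "EMPTY" = PySem.List.pySetD b i "EMPTY" := by
        rw [PySem.List.pySetD_of_nonneg _ _ (by omega : (0:Int) ≤ i+1),
            PySem.List.pySetD_of_nonneg _ _ h0, hb']
        show ((b.set a k).set c "EMPTY").set a "EMPTY" = b.set c "EMPTY"
        rw [List.set_comm _ _ hac.symm, List.set_set]
        have : b.set a "EMPTY" = b := by rw [← he]; exact List.set_getElem_self hal
        rw [this]
      rw [hbeq, hlen']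
    · have hstop : aRight b i = (b, i) := by
        rw [aRight]
        simp only [dif_pos hp, hgp, hgi, if_neg he]
      rw [hstop]
      have hscan : scanR b i (b.length : Int) = i := by
        rw [scanR]
        rw [dif_pos ⟨hp, hin⟩, hdp, if_neg he]
      rw [aRightCap]
      simp only [if_pos hp, hgp, hgi, if_neg he, ite_not]
      rw [hscan, if_pos ⟨hp, hin⟩, hdi,
          PySem.List.pySetD_of_nonneg _ _ (by omega : (0:Int) ≤ i+1),
          PySem.List.pySetD_of_nonneg _ _ h0,
          PySem.List.pySetD_of_nonneg _ _ (by omega : (0:Int) ≤ i+1),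
          PySem.List.pySetD_of_nonneg _ _ h0]
      exact List.set_comm _ _ (by omega)
  · have hstop : aRight b i = (b, i) := by rw [aRight]; simp [hp]
    rw [hstop]
    have hscan : scanR b i (b.length : Int) = i := by
      rw [scanR]; simp only [dif_neg (show ¬(i < 8 ∧ i + 1 < (b.length:Int)) by omega)]
    rw [aRightCap, if_neg hp, hscan,
        if_neg (show ¬(i < 8 ∧ i + 1 < (b.length:Int)) by omega), hdi,
        PySem.List.pySetD_of_nonneg _ _ h0, PySem.List.pySetD_of_nonneg _ _ h0,
        List.set_set, List.set_getElem_self (by omega)]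
termination_by (8 - i).toNat
decreasing_by omega

theorem drop_blocker (b : List String) (p : Int) (h0 : 0 ≤ p)
    (h : ¬ (b.drop (p.toNat + 1)).all (· = "EMPTY")) :
    ∃ m : Int, p < m ∧ m < (b.length : Int) ∧ PySem.List.pyGetD b m "" ≠ "EMPTY" := by
  have ⟨x, hx, hxe⟩ : ∃ x ∈ b.drop (p.toNat + 1), ¬ (x = "EMPTY") := by
    simpa [List.all_eq_true] using h
  obtain ⟨k, hk, hkx⟩ := List.mem_iff_getElem.mp hx
  rw [List.getElem_drop] at hkx
  have hklen : p.toNat + 1 + k < b.length := by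
    have := List.length_drop (l := b) (i := p.toNat + 1); omega
  refine ⟨((p.toNat + 1 + k : Nat) : Int), by omega, by exact_mod_cast hklen, ?_⟩
  rw [PySem.List.pyGetD_eq_getElem b _ (by omega) (by exact_mod_cast hklen)]
  intro hcon
  apply hxe
  rw [← hkx, ← hcon]
  simp only [Int.toNat_natCast]

theorem set_self_id (b : List String) (p : Int) (h0 : 0 ≤ p) (h1 : p < (b.length : Int)) :
    PySem.List.pySetD (PySem.List.pySetD b p "EMPTY") p (PySem.List.pyGetD b p "") = b := by
  rw [PySem.List.pyGetD_eq_getElem b _ h0 h1,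
      PySem.List.pySetD_of_nonneg _ _ h0, PySem.List.pySetD_of_nonneg _ _ h0,
      List.set_set, List.set_getElem_self (by omega)]

-- ===== VERDICT (by name: the statement is the Claim_ definition above) =====
theorem move_king_spec : Claim_equal_move_king := by
  unfold Claim_equal_move_king
  intro b p d _ hpre
  unfold Spec_move_king move_king move_king_alt
  obtain ⟨hL, hR⟩ := hpre
  by_cases hdl : d = "LEFT"
  · simp only [hdl, String.reduceEq, reduceIte, true_and, false_and]
    by_cases hc : 0 < p ∧ p < (b.length : Int)
    · rw [if_pos hc]
      exact left_eq b p (by omega) hc.2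
    · rw [if_neg hc]
      have hp0 : ¬ 0 < p := fun hgt => hc ⟨hgt, (hL hdl).resolve_left (by omega)⟩
      have hA : aLeft b p = (b, p) := by rw [aLeft]; simp [hp0]
      rw [hA]
      simp [aLeftCap, hp0]
  · by_cases hdr : d = "RIGHT"
    · simp only [hdr, String.reduceEq, reduceIte, true_and, false_and]
      rcases hR hdr with h8 | ⟨h0', h1', hside⟩
      · have hns : ¬ p < 8 := by omega
        have hA : aRight b p = (b, p) := by rw [aRight]; simp [hns]
        rw [hA]
        by_cases hc : 0 ≤ p ∧ p < (b.length : Int)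
        · rw [if_pos hc]
          have hscan : scanR b p (b.length : Int) = p := by
            rw [scanR]
            simp only [dif_neg (show ¬(p < 8 ∧ p + 1 < (b.length:Int)) by omega)]
          rw [aRightCap, if_neg hns, hscan,
              if_neg (show ¬(p < 8 ∧ p + 1 < (b.length:Int)) by omega)]
          exact (set_self_id b p hc.1 hc.2).symm
        · rw [if_neg hc, aRightCap, if_neg hns]
      · have hs : 8 < (b.length : Int) ∨
            ∃ m : Int, p < m ∧ m < (b.length : Int) ∧ PySem.List.pyGetD b m "" ≠ "EMPTY" := by
          rcases hside with h9 | hblk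
          · exact Or.inl (by omega)
          · exact Or.inr (drop_blocker b p h0' hblk)
        rw [if_pos ⟨h0', h1'⟩]
        exact right_eq b p h0' h1' hs
    · simp only [if_neg hdl, if_neg hdr]
      have h1 : ¬ (d = "LEFT" ∧ 0 < p ∧ p < (b.length:Int)) := fun h => hdl h.1
      have h2 : ¬ (d = "RIGHT" ∧ 0 ≤ p ∧ p < (b.length:Int)) := fun h => hdr h.1
      simp only [if_neg h1, if_neg h2]
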